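-- pv_equiv track=rewrite | github.com/briossant/advent-of-code-2023 | day-01/star2.py | remove_lettres
-- ===== SOURCE A (Python) =====
-- other_format = ["one", "two", "three", "four",
--                 "five", "six", "seven", "eight", "nine"]
--
-- def remove_lettres(lines):
--     res = []
--     for l in lines:
--         nl = ""
--         for i in range(len(l)):
--             if ord(l[i]) >= ord('0') and ord(l[i]) <= ord('9'):
--                 nl += l[i]
--             else:
--                 for j in range(len(other_format)):
--                     if l[i:i+len(other_format[j])] == other_format[j]:
--                         nl += str(j+1)
--         res.append(nl)
--     return res
-- ===== SOURCE B (Python) =====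
-- other_format = ["one", "two", "three", "four",
--                 "five", "six", "seven", "eight", "nine"]
--
-- def remove_lettres(lines):
--     res = []
--     for l in lines:
--         # collect (position, output char) pairs: ASCII digits plus every
--         # (overlapping) occurrence of a spelled-out number word, then order by position
--         pairs = [(i, c) for i, c in enumerate(l) if '0' <= c <= '9']
--         for j, w in enumerate(other_format):
--             pairs += [(i, str(j + 1)) for i in range(len(l)) if l.startswith(w, i)]
--         pairs.sort(key=lambda p: p[0])
--         res.append(''.join(c for _, c in pairs))
--     return res
-- ===== Notes on version B (the rewrite author's own statement) =====
-- stated objective: alternative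
-- what changed: A scans each line position by position, testing all nine words at every index and appending as it goes; B instead builds, per line, a list of (position, emitted chars) pairs word by word (plus the ASCII-digit positions), then sorts the pairs by position and joins them.
import Mathlib
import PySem

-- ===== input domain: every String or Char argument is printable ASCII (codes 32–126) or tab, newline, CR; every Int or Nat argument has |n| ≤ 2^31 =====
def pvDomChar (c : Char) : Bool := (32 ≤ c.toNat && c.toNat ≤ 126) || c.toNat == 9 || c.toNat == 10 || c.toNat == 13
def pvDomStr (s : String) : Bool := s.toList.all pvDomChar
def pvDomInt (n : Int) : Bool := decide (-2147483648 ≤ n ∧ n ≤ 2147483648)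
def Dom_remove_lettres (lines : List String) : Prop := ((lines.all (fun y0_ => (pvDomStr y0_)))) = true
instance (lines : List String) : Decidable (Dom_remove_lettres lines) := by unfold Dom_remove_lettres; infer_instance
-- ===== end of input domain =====

-- B replaces A's per-position scan (testing every word at every index) by an index-building
-- pass: collect (position, emitted chars) pairs per word and per digit, sort by position, join.
-- Objective: alternative decomposition; equal cost, not claimed faster.

-- ===== PORT A =====
-- module constant other_format (strings kept as List Char; proofs stay on the list side)
def other_format_chars : List (List Char) :=
  [['o','n','e'], ['t','w','o'], ['t','h','r','e','e'], ['f','o','u','r'],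
   ['f','i','v','e'], ['s','i','x'], ['s','e','v','e','n'], ['e','i','g','h','t'], ['n','i','n','e']]

-- the body of A's outer 'for l in lines' loop: builds nl for one line
def removeLine (l : List Char) : List Char :=
  (PySem.List.pyRange 0 l.length).foldl (fun nl i =>
    -- if ord(l[i]) >= ord('0') and ord(l[i]) <= ord('9'): nl += l[i]
    if '0'.toNat ≤ (PySem.List.pyGetD l i ' ').toNat ∧ (PySem.List.pyGetD l i ' ').toNat ≤ '9'.toNat then
      nl ++ [PySem.List.pyGetD l i ' ']
    else
      -- for j in range(len(other_format)): if l[i:i+len(other_format[j])] == other_format[j]: nl += str(j+1)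
      (PySem.List.pyRange 0 other_format_chars.length).foldl (fun nl2 j =>
        if PySem.List.slice l (some i) (some (i + ((PySem.List.pyGetD other_format_chars j []).length : Int))) =
             PySem.List.pyGetD other_format_chars j [] then
          nl2 ++ PySem.Int.toChars (j + 1)
        else nl2) nl) []

def remove_lettres (lines : List String) : List String :=
  lines.foldl (fun res l => res ++ [String.ofList (removeLine l.toList)]) []

-- ===== PORT B =====
-- the body of B's outer loop: pairs of (position, emitted chars), sorted by position, joined
def removeLineAlt (l : List Char) : List Char :=
  -- [(i, c) for i, c in enumerate(l) if '0' <= c <= '9']  (each 1-char string as List Char)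
  let pairs0 : List (Int × List Char) :=
    ((PySem.List.enumerate l).filter (fun p => decide ('0' ≤ p.2 ∧ p.2 ≤ '9'))).map
      (fun p => (p.1, [p.2]))
  -- for j, w in enumerate(other_format): pairs += [(i, str(j+1)) for i in range(len(l)) if l.startswith(w, i)]
  -- (l.startswith(w, i) with 0 ≤ i ported exactly as: w is a prefix of l[i:])
  let pairs : List (Int × List Char) :=
    (PySem.List.enumerate other_format_chars).foldl (fun acc jw =>
      acc ++ ((PySem.List.pyRange 0 l.length).filter
                (fun i => PySem.Chars.startswith (l.drop i.toNat) jw.2)).map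
             (fun i => (i, PySem.Int.toChars (jw.1 + 1)))) pairs0
  -- pairs.sort(key=lambda p: p[0]); ''.join(c for _, c in pairs)
  (PySem.List.sorted pairs (fun p => p.1)).flatMap (fun p => p.2)

def remove_lettres_alt (lines : List String) : List String :=
  lines.foldl (fun res l => res ++ [String.ofList (removeLineAlt l.toList)]) []

-- ===== PRECONDITION & SPEC =====
def Spec_remove_lettres (lines : List String) (out : List String) : Prop := out = remove_lettres_alt lines
instance (lines : List String) (out : List String) : Decidable (Spec_remove_lettres lines out) := by unfold Spec_remove_lettres; infer_instance

-- ===== CLAIM (what is proved, stated in full; the proofs are below) =====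
def Claim_equal_remove_lettres : Prop := ∀ (lines : List String), Dom_remove_lettres lines → Spec_remove_lettres lines (remove_lettres lines)

-- ===== LEMMAS AND PROOFS =====

-- proof-side view of one line: per position k, the digit block and the word block
def dblk (l : List Char) (k : Nat) : List (Int × List Char) :=
  if '0' ≤ l.getD k ' ' ∧ l.getD k ' ' ≤ '9' then [((k : Int), [l.getD k ' '])] else []

def wblk (l : List Char) (k : Nat) : List (Int × List Char) :=
  (List.range 9).flatMap (fun j =>
    if other_format_chars.getD j [] <+: l.drop k then [((k : Int), PySem.Int.toChars ((j : Int) + 1))] else [])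

def targetPairs (l : List Char) : List (Int × List Char) :=
  (List.range l.length).flatMap (fun k => dblk l k ++ wblk l k)

-- generic list lemmas
theorem flatMap_if_singleton {α β : Type} (p : α → Prop) [DecidablePred p] (g : α → β) (xs : List α) :
    xs.flatMap (fun x => if p x then [g x] else []) = (xs.filter (fun x => decide (p x))).map g := by
  induction xs with
  | nil => rfl
  | cons a t ih => by_cases h : p a <;> simp [h, ih]

theorem perm_flatMap_append {α β : Type} (f g : α → List β) (xs : List α) :
    (xs.flatMap (fun x => f x ++ g x)).Perm (xs.flatMap f ++ xs.flatMap g) := by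
  induction xs with
  | nil => rfl
  | cons a t ih =>
    simp only [List.flatMap_cons]
    refine (List.Perm.append_left (f a ++ g a) ih).trans ?_
    simpa [List.append_assoc] using
      (List.Perm.append_left (f a)
        (List.perm_append_comm_assoc (g a) (t.flatMap f) (t.flatMap g)))

theorem perm_flatMap_swap {α β γ : Type} (h : α → γ → List β) (xs : List α) (ys : List γ) :
    (xs.flatMap (fun x => ys.flatMap (fun y => h x y))).Perm
      (ys.flatMap (fun y => xs.flatMap (fun x => h x y))) := by
  induction xs with
  | nil => simp
  | cons a t ih =>
    simp only [List.flatMap_cons]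
    refine List.Perm.trans (List.Perm.append_left _ ih) ?_
    exact (perm_flatMap_append (fun y => h a y) (fun y => t.flatMap (fun x => h x y)) ys).symm

-- facts about the nine words, checked by decide
theorem words_prefix_eq : ∀ w1 ∈ other_format_chars, ∀ w2 ∈ other_format_chars, w1 <+: w2 → w1 = w2 := by decide
theorem words_nodup : other_format_chars.Nodup := by decide
theorem words_head : ∀ w ∈ other_format_chars, w ≠ [] ∧ ¬('0' ≤ w.headD ' ' ∧ w.headD ' ' ≤ '9') := by decide

theorem char_le_iff_toNat (a b : Char) : a ≤ b ↔ a.toNat ≤ b.toNat := by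
  rw [Char.le_def, UInt32.le_iff_toNat_le]; rfl

theorem digit_test_iff (c : Char) : ('0'.toNat ≤ c.toNat ∧ c.toNat ≤ '9'.toNat) ↔ ('0' ≤ c ∧ c ≤ '9') := by
  simp [char_le_iff_toNat]

-- at a digit position no word starts
theorem wblk_eq_nil_of_digit (l : List Char) (k : Nat) (hk : k < l.length)
    (hd : '0' ≤ l.getD k ' ' ∧ l.getD k ' ' ≤ '9') : wblk l k = [] := by
  unfold wblk
  rw [List.flatMap_eq_nil_iff]
  intro j hj
  rw [if_neg]
  intro hpre
  have hw : other_format_chars.getD j [] ∈ other_format_chars := by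
    rw [List.mem_range] at hj
    rw [List.getD_eq_getElem _ _ hj]
    exact List.getElem_mem hj
  obtain ⟨hne, hhead⟩ := words_head _ hw
  obtain ⟨c, w', hcw⟩ := List.exists_cons_of_ne_nil hne
  rw [List.drop_eq_getElem_cons hk] at hpre
  rw [hcw, List.cons_prefix_cons] at hpre
  apply hhead
  rw [hcw]
  simpa [hpre.1, List.getD_eq_getElem?_getD, List.getElem?_eq_getElem hk] using hd

-- at most one word starts at a given position
-- two distinct indices below 9 cannot both name a word starting at k
theorem words_at_eq (l : List Char) (k : Nat) (j1 j2 : Nat) (h1 : j1 < 9) (h2 : j2 < 9)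
    (hp1 : other_format_chars.getD j1 [] <+: l.drop k)
    (hp2 : other_format_chars.getD j2 [] <+: l.drop k) : j1 = j2 := by
  have e1 : other_format_chars.getD j1 [] = other_format_chars[j1] := List.getD_eq_getElem _ _ h1
  have e2 : other_format_chars.getD j2 [] = other_format_chars[j2] := List.getD_eq_getElem _ _ h2
  have hm1 : other_format_chars[j1] ∈ other_format_chars := List.getElem_mem h1
  have hm2 : other_format_chars[j2] ∈ other_format_chars := List.getElem_mem h2
  rw [e1] at hp1; rw [e2] at hp2
  have heq : other_format_chars[j1] = other_format_chars[j2] := by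
    rcases List.prefix_or_prefix_of_prefix hp1 hp2 with h | h
    · exact words_prefix_eq _ hm1 _ hm2 h
    · exact (words_prefix_eq _ hm2 _ hm1 h).symm
  exact (List.Nodup.getElem_inj_iff words_nodup).mp heq

theorem wblk_length_le_one (l : List Char) (k : Nat) : (wblk l k).length ≤ 1 := by
  unfold wblk
  rw [flatMap_if_singleton (fun j => other_format_chars.getD j [] <+: l.drop k)
        (fun j => ((k : Int), PySem.Int.toChars ((j : Int) + 1)))]
  rw [List.length_map]
  rcases hF : (List.range 9).filter (fun j => decide (other_format_chars.getD j [] <+: l.drop k)) with _ | ⟨j1, _ | ⟨j2, rest⟩⟩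
  · simp
  · simp
  · exfalso
    have hnd : ((List.range 9).filter
        (fun j => decide (other_format_chars.getD j [] <+: l.drop k))).Nodup :=
      (List.nodup_range).filter _
    rw [hF] at hnd
    have hne : j1 ≠ j2 := by
      intro h; subst h; simp at hnd
    have hm1 : j1 ∈ (List.range 9).filter (fun j => decide (other_format_chars.getD j [] <+: l.drop k)) := by
      rw [hF]; simp
    have hm2 : j2 ∈ (List.range 9).filter (fun j => decide (other_format_chars.getD j [] <+: l.drop k)) := by
      rw [hF]; simp
    rw [List.mem_filter, List.mem_range] at hm1 hm2
    exact hne (words_at_eq l k j1 j2 hm1.1 hm2.1 (by simpa using hm1.2) (by simpa using hm2.2))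

theorem blk_fst (l : List Char) (k : Nat) : ∀ p ∈ dblk l k ++ wblk l k, p.1 = (k : Int) := by
  intro p hp
  rcases List.mem_append.1 hp with h | h
  · unfold dblk at h
    split at h
    · simp at h; simp [h]
    · simp at h
  · unfold wblk at h
    rw [List.mem_flatMap] at h
    obtain ⟨j, _, hmem⟩ := h
    split at hmem
    · simp at hmem; simp [hmem]
    · simp at hmem

theorem blk_length_le_one (l : List Char) (k : Nat) (hk : k < l.length) :
    (dblk l k ++ wblk l k).length ≤ 1 := by
  by_cases hd : '0' ≤ l.getD k ' ' ∧ l.getD k ' ' ≤ '9'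
  · rw [wblk_eq_nil_of_digit l k hk hd]
    unfold dblk
    split <;> simp
  · unfold dblk
    rw [if_neg hd]
    simpa using wblk_length_le_one l k

theorem pairwise_blocks {β : Type} (f : Nat → List (Int × β)) (n : Nat)
    (hfst : ∀ k, ∀ p ∈ f k, p.1 = (k : Int))
    (hlen : ∀ k, k < n → (f k).length ≤ 1) :
    ((List.range n).flatMap f).Pairwise (fun p q => p.1 < q.1) := by
  induction n with
  | zero => simp
  | succ m ih =>
    rw [List.range_succ, List.flatMap_append]
    rw [List.pairwise_append]
    refine ⟨ih (fun k hk => hlen k (Nat.lt_succ_of_lt hk)), ?_, ?_⟩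
    · simp only [List.flatMap_cons, List.flatMap_nil, List.append_nil]
      have hl := hlen m (Nat.lt_succ_self m)
      rcases hfm : f m with _ | ⟨a, _ | ⟨b, t⟩⟩
      · simp
      · simp
      · rw [hfm] at hl; simp at hl
    · intro p hp q hq
      rw [List.mem_flatMap] at hp
      obtain ⟨k, hk, hpk⟩ := hp
      rw [List.mem_range] at hk
      simp only [List.flatMap_cons, List.flatMap_nil, List.append_nil] at hq
      rw [hfst k p hpk, hfst m q hq]
      exact_mod_cast hk

theorem pairwise_targetPairs (l : List Char) :
    (targetPairs l).Pairwise (fun p q => p.1 < q.1) := by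
  unfold targetPairs
  exact pairwise_blocks _ _ (fun k => blk_fst l k)
    (fun k hk => blk_length_le_one l k hk)

theorem slice_eq_iff_prefix (l w : List Char) (k : Nat) :
    (PySem.List.slice l (some (k : Int)) (some ((k : Int) + (w.length : Int))) = w) ↔ w <+: l.drop k := by
  have h : ((k : Int) + (w.length : Int)) = ((k + w.length : Nat) : Int) := by push_cast; ring
  rw [h, PySem.List.slice_natCast, Nat.add_sub_cancel_left]
  constructor
  · intro h2; rw [List.prefix_iff_eq_take]; exact h2.symm
  · intro h2; exact (List.prefix_iff_eq_take.1 h2).symm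

theorem innerA_eq (l : List Char) (i : Int) (nl : List Char) :
    (PySem.List.pyRange 0 (other_format_chars.length : Int)).foldl (fun nl2 j =>
        if PySem.List.slice l (some i) (some (i + ((PySem.List.pyGetD other_format_chars j []).length : Int))) =
             PySem.List.pyGetD other_format_chars j [] then
          nl2 ++ PySem.Int.toChars (j + 1)
        else nl2) nl
    = nl ++ (List.range 9).flatMap (fun j =>
        if PySem.List.slice l (some i) (some (i + ((other_format_chars.getD j []).length : Int))) =
             other_format_chars.getD j [] then PySem.Int.toChars ((j : Int) + 1) else []) := by
  have hlen : (other_format_chars.length : Int) = ((9 : Nat) : Int) := rfl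
  rw [hlen, PySem.List.pyRange_zero_natCast, List.foldl_map]
  rw [PySem.List.foldl_congr_mem _ _ (fun nl2 j =>
      nl2 ++ (if PySem.List.slice l (some i) (some (i + ((other_format_chars.getD j []).length : Int))) =
             other_format_chars.getD j [] then PySem.Int.toChars ((j : Int) + 1) else [])) _ ?_]
  · exact PySem.List.foldl_append_eq_flatMap _ _ _
  · intro acc x _
    rw [PySem.List.pyGetD_natCast]
    split
    · rename_i h; beta_reduce; rw [if_pos h]
    · rename_i h; beta_reduce; rw [if_neg h, List.append_nil]

theorem removeLine_eq_target (l : List Char) :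
    removeLine l = (targetPairs l).flatMap (fun p => p.2) := by
  unfold removeLine targetPairs
  rw [PySem.List.pyRange_zero_natCast l.length, List.foldl_map]
  rw [PySem.List.foldl_congr_mem _ _
      (fun nl k => nl ++ (dblk l k ++ wblk l k).flatMap (fun p => p.2)) _ ?_]
  · rw [PySem.List.foldl_append_eq_flatMap, List.nil_append, List.flatMap_assoc]
  · intro acc k hk
    rw [List.mem_range] at hk
    rw [innerA_eq]
    rw [PySem.List.pyGetD_natCast]
    beta_reduce
    by_cases hd : '0' ≤ l.getD k ' ' ∧ l.getD k ' ' ≤ '9'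
    · rw [if_pos ((digit_test_iff _).2 hd)]
      rw [wblk_eq_nil_of_digit l k hk hd]
      unfold dblk
      rw [if_pos hd]
      simp
    · rw [if_neg (fun h => hd ((digit_test_iff _).1 h))]
      unfold dblk wblk
      rw [if_neg hd, List.nil_append, List.flatMap_assoc]
      congr 1
      refine congrArg (fun f => List.flatMap f (List.range 9)) (funext fun j => ?_)
      by_cases hp : other_format_chars.getD j [] <+: l.drop k
      · rw [if_pos ((slice_eq_iff_prefix l _ k).2 hp), if_pos hp]; simp
      · rw [if_neg (fun h => hp ((slice_eq_iff_prefix l _ k).1 h)), if_neg hp]; simp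


theorem startswith_eq_decide (s w : List Char) : PySem.Chars.startswith s w = decide (w <+: s) := by
  by_cases h : w <+: s
  · rw [decide_eq_true h]
    exact (PySem.Chars.startswith_iff s w).2 h
  · rw [decide_eq_false h]
    exact Bool.eq_false_iff.mpr (fun hb => h ((PySem.Chars.startswith_iff s w).1 hb))

theorem removeLineAlt_eq_target (l : List Char) :
    removeLineAlt l = (targetPairs l).flatMap (fun p => p.2) := by
  have hpairs0 : ((PySem.List.enumerate l).filter (fun p => decide ('0' ≤ p.2 ∧ p.2 ≤ '9'))).map
      (fun p => (p.1, [p.2])) = (List.range l.length).flatMap (dblk l) := by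
    unfold dblk
    rw [flatMap_if_singleton (fun k => '0' ≤ l.getD k ' ' ∧ l.getD k ' ' ≤ '9')
          (fun k => ((k : Int), [l.getD k ' ']))]
    rw [PySem.List.enumerate_eq_map_pyRange l ' ']
    rw [show PySem.List.len l = ((l.length : Nat) : Int) from rfl]
    rw [PySem.List.pyRange_zero_natCast, List.map_map, List.filter_map, List.map_map]
    simp [Function.comp_def, PySem.List.pyGetD_natCast]
  have hwords : ∀ P : List (Int × List Char),
      (PySem.List.enumerate other_format_chars).foldl (fun acc jw =>
        acc ++ ((PySem.List.pyRange 0 l.length).filter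
                  (fun i => PySem.Chars.startswith (l.drop i.toNat) jw.2)).map
               (fun i => (i, PySem.Int.toChars (jw.1 + 1)))) P
      = P ++ (List.range 9).flatMap (fun j => (List.range l.length).flatMap (fun k =>
          if other_format_chars.getD j [] <+: l.drop k then
            [((k : Int), PySem.Int.toChars ((j : Int) + 1))] else [])) := by
    intro P
    rw [PySem.List.foldl_append_eq_flatMap]
    congr 1
    rw [PySem.List.enumerate_eq_map_pyRange other_format_chars []]
    rw [show PySem.List.len other_format_chars = ((9 : Nat) : Int) from rfl]
    rw [PySem.List.pyRange_zero_natCast 9, PySem.List.pyRange_zero_natCast l.length]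
    rw [List.flatMap_map, List.flatMap_map]
    refine congrArg (fun f => List.flatMap f (List.range 9)) (funext fun j => ?_)
    rw [flatMap_if_singleton (fun k => other_format_chars.getD j [] <+: l.drop k)
          (fun k => ((k : Int), PySem.Int.toChars ((j : Int) + 1)))]
    rw [List.filter_map, List.map_map]
    simp only [Function.comp_def, Int.toNat_natCast, startswith_eq_decide, PySem.List.pyGetD_natCast]
    rfl
  simp only [removeLineAlt]
  rw [hpairs0, hwords]
  have hperm : (targetPairs l).Perm
      ((List.range l.length).flatMap (dblk l) ++ (List.range 9).flatMap (fun j =>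
        (List.range l.length).flatMap (fun k =>
          if other_format_chars.getD j [] <+: l.drop k then
            [((k : Int), PySem.Int.toChars ((j : Int) + 1))] else []))) := by
    unfold targetPairs
    refine (perm_flatMap_append (dblk l) (wblk l) (List.range l.length)).trans ?_
    refine List.Perm.append_left _ ?_
    unfold wblk
    exact perm_flatMap_swap (fun k j =>
      if other_format_chars.getD j [] <+: l.drop k then
        [((k : Int), PySem.Int.toChars ((j : Int) + 1))] else []) (List.range l.length) (List.range 9)
  rw [PySem.List.sorted_eq_of_perm_of_pairwise_lt _ (targetPairs l) (fun p => p.1) hperm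
        (pairwise_targetPairs l)]

-- ===== VERDICT (by name: the statement is the Claim_ definition above) =====
theorem remove_lettres_spec : Claim_equal_remove_lettres := by
  intro lines _
  unfold Spec_remove_lettres remove_lettres remove_lettres_alt
  simp only [PySem.List.foldl_append_singleton_eq_map, List.nil_append]
  have h : (fun l : String => String.ofList (removeLine l.toList))
      = (fun l : String => String.ofList (removeLineAlt l.toList)) :=
    funext fun l => by rw [removeLine_eq_target l.toList, ← removeLineAlt_eq_target l.toList]
  rw [h]
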